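-- pv_equiv track=rewrite | github.com/gobelo7/gobelo_grammar_toolkit | gobelo_poster/conjugator/morphophonology.py | ca2_palatalize
-- ===== SOURCE A (Python) =====
-- FRONT_V     = frozenset('ie')
--
-- def ca2_palatalize(segment: str, lang: str) -> str:
--     """
--     CA.2: k → ch (ChiNyanja) or c (Chitonga/others) before front vowels.
--     Applied to the NC7 prefix and similar contexts.
--     """
--     if not segment:
--         return segment
--     reflex = 'ch' if lang == 'chinyanja' else 'c'
--     result = []
--     chars = list(segment)
--     for i, c in enumerate(chars):
--         if c == 'k' and i + 1 < len(chars) and chars[i + 1] in FRONT_V: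
--             result.append(reflex)
--         else:
--             result.append(c)
--     return ''.join(result)
-- ===== SOURCE B (Python) =====
-- def ca2_palatalize(segment: str, lang: str) -> str:
--     """CA.2 via two native substring substitutions instead of an indexed character loop."""
--     if lang == 'chinyanja':
--         return segment.replace('ki', 'chi').replace('ke', 'che')
--     return segment.replace('ki', 'ci').replace('ke', 'ce')
-- ===== Notes on version B (the rewrite author's own statement) =====
-- stated objective: faster
-- what changed: Replaces the indexed per-character loop (enumerate + chars[i+1] lookahead test + list append + join) with two native substring substitutions, segment.replace('ki', reflex+'i').replace('ke', reflex+'e'), which are non-overlapping and cannot create new matches, so they yield the identical string.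
import Mathlib
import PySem

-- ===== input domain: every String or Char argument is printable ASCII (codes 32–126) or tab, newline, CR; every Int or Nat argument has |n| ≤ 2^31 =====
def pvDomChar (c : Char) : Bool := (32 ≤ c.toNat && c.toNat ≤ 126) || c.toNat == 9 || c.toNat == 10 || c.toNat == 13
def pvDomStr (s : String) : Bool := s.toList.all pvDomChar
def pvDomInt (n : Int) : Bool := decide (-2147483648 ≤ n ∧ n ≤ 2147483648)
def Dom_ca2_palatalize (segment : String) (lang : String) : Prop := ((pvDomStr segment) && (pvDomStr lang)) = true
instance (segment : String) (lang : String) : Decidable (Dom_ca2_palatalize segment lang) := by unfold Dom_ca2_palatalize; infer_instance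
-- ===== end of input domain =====

-- B replaces the indexed character loop by two native substring substitutions ('ki'→reflex+'i', 'ke'→reflex+'e'); same return value, simpler and faster in Python.

-- ===== PORT A =====
def ca2_palatalize (segment : String) (lang : String) : String :=
  if segment = "" then segment
  else
    let reflex : List Char := if lang = "chinyanja" then ['c', 'h'] else ['c']
    let chars : List Char := segment.toList
    -- ''.join(result): the appended pieces are kept as char lists and flattened, exact
    let result : List Char :=
      (PySem.List.enumerate chars).foldl (fun acc ic =>
        if ic.2 = 'k' ∧ ic.1 + 1 < (chars.length : Int) ∧
            (PySem.List.pyGet? chars (ic.1 + 1) = some 'i' ∨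
             PySem.List.pyGet? chars (ic.1 + 1) = some 'e')
        then acc ++ reflex else acc ++ [ic.2]) []
    String.ofList result

-- ===== PORT B =====
def ca2_palatalize_alt (segment : String) (lang : String) : String :=
  if lang = "chinyanja" then
    PySem.Str.replace (PySem.Str.replace segment "ki" "chi") "ke" "che"
  else
    PySem.Str.replace (PySem.Str.replace segment "ki" "ci") "ke" "ce"

-- ===== PRECONDITION & SPEC =====
def Spec_ca2_palatalize (segment : String) (lang : String) (out : String) : Prop := out = ca2_palatalize_alt segment lang
instance (segment : String) (lang : String) (out : String) : Decidable (Spec_ca2_palatalize segment lang out) := by unfold Spec_ca2_palatalize; infer_instance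

-- ===== CLAIM (what is proved, stated in full; the proofs are below) =====
def Claim_equal_ca2_palatalize : Prop := ∀ (segment : String) (lang : String), Dom_ca2_palatalize segment lang → Spec_ca2_palatalize segment lang (ca2_palatalize segment lang)

-- ===== LEMMAS AND PROOFS =====

-- A's per-character rewrite, as a structural recursion (the common spec of both ports)
def palRep (reflex : List Char) : List Char → List Char
  | [] => []
  | c :: t => (if c = 'k' ∧ (t.head? = some 'i' ∨ t.head? = some 'e') then reflex else [c]) ++ palRep reflex t

-- str.replace with a fixed two-character pattern [a, b], fuel-free
def rep2 (a b : Char) (r : List Char) : List Char → List Char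
  | [] => []
  | [c] => [c]
  | c :: d :: t => if c = a ∧ d = b then r ++ rep2 a b r t else c :: rep2 a b r (d :: t)

lemma rep2_cons_not {a b c : Char} {r t : List Char}
    (h : ¬(c = a ∧ t.head? = some b)) : rep2 a b r (c :: t) = c :: rep2 a b r t := by
  cases t with
  | nil => simp [rep2]
  | cons d t' =>
    rw [rep2, if_neg]
    rintro ⟨h1, h2⟩
    exact h ⟨h1, by simp [h2]⟩

lemma rep2_match (a b : Char) (r t : List Char) : rep2 a b r (a :: b :: t) = r ++ rep2 a b r t := by
  simp [rep2]

lemma go_eq_rep2 (a b : Char) (r : List Char) :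
    ∀ (fuel : Nat) (l acc : List Char), l.length ≤ fuel →
      PySem.Chars.replace.go [a, b] r fuel l acc = acc.reverse ++ rep2 a b r l := by
  intro fuel
  induction fuel with
  | zero =>
    intro l acc h
    have hl : l = [] := by cases l <;> simp_all
    subst hl
    simp [PySem.Chars.replace.go, rep2]
  | succ f ih =>
    intro l acc h
    cases l with
    | nil => simp [PySem.Chars.replace.go, rep2]
    | cons c t =>
      cases t with
      | nil =>
        have hpre : List.isPrefixOf [a, b] [c] = false := by
          simp [List.isPrefixOf]
        rw [PySem.Chars.replace.go]
        simp only [hpre, Bool.false_eq_true, if_false]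
        rw [ih [] (c :: acc) (by simp)]
        simp [rep2]
      | cons d t' =>
        rw [PySem.Chars.replace.go]
        by_cases hm : a = c ∧ b = d
        · have hpre : List.isPrefixOf [a, b] (c :: d :: t') = true := by
            simp [List.isPrefixOf, hm.1, hm.2]
          simp only [hpre, if_true]
          rw [ih (List.drop [a,b].length (c :: d :: t')) (r.reverse ++ acc)
              (by simp at h ⊢; omega)]
          have : rep2 a b r (c :: d :: t') = r ++ rep2 a b r t' := by
            rw [← hm.1, ← hm.2, rep2_match]
          simp [this]
        · have hpre : List.isPrefixOf [a, b] (c :: d :: t') = false := by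
            simp [List.isPrefixOf]
            intro h1 h2; exact absurd ⟨h1, h2⟩ hm
          simp only [hpre, Bool.false_eq_true, if_false]
          rw [ih (d :: t') (c :: acc) (by simp at h ⊢; omega)]
          have hre : rep2 a b r (c :: d :: t') = c :: rep2 a b r (d :: t') :=
            rep2_cons_not (by rintro ⟨h1, h2⟩; simp at h2; exact hm ⟨h1.symm, h2.symm⟩)
          rw [hre]; simp

lemma replace_eq_rep2 (a b : Char) (r l : List Char) :
    PySem.Chars.replace l [a, b] r = rep2 a b r l := by
  rw [PySem.Chars.replace]
  simp only [List.isEmpty_cons, Bool.false_eq_true, if_false]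
  rw [go_eq_rep2 a b r l.length l [] le_rfl]
  simp

lemma rep2_append_left {a b : Char} {r : List Char} (p X : List Char)
    (hp : ∀ x ∈ p, x ≠ a) : rep2 a b r (p ++ X) = p ++ rep2 a b r X := by
  induction p with
  | nil => simp
  | cons c p' ih =>
    rw [List.cons_append, rep2_cons_not (by rintro ⟨h1, _⟩; exact hp c (by simp) h1)]
    rw [ih (fun x hx => hp x (by simp [hx]))]; simp

lemma head?_rep2_ne {a b : Char} {r : List Char} (e : Char) (hr0 : r ≠ [])
    (hr : r.head? ≠ some e) (x : Char) (hx : x ≠ e) (xs : List Char) :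
    (rep2 a b r (x :: xs)).head? ≠ some e := by
  cases xs with
  | nil => simp [rep2, hx]
  | cons d t =>
    by_cases hm : x = a ∧ d = b
    · rw [hm.1, hm.2, rep2_match]
      cases r with
      | nil => exact absurd rfl hr0
      | cons y ys => simpa using hr
    · rw [rep2_cons_not (by rintro ⟨h1, h2⟩; simp at h2; exact hm ⟨h1, h2⟩)]
      simp [hx]

-- the double substitution equals the per-character rewrite
lemma rep2_rep2_eq_palRep (new : List Char) (h0 : new.head? = some 'c') (hk : 'k' ∉ new) :
    ∀ l, rep2 'k' 'e' (new ++ ['e']) (rep2 'k' 'i' (new ++ ['i']) l) = palRep new l := by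
  have hnew0 : new ≠ [] := by cases new <;> simp_all
  have H : ∀ (n : Nat) (l : List Char), l.length ≤ n →
      rep2 'k' 'e' (new ++ ['e']) (rep2 'k' 'i' (new ++ ['i']) l) = palRep new l := by
    intro n
    induction n with
    | zero =>
      intro l h
      have : l = [] := by cases l <;> simp_all
      subst this; simp [rep2, palRep]
    | succ m ih =>
      intro l h
      match l with
      | [] => simp [rep2, palRep]
      | [c] => simp [rep2, palRep]
      | c :: d :: t =>
        by_cases hck : c = 'k'
        · subst hck
          by_cases hdi : d = 'i'
          · subst hdi
            rw [rep2_match, rep2_append_left (new ++ ['i']) _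
                (by intro x hx; simp at hx
                    rcases hx with hx | hx
                    · exact fun he => hk (he ▸ hx)
                    · simp [hx])]
            rw [ih t (by simp at h; omega)]
            simp [palRep]
          · by_cases hde : d = 'e'
            · subst hde
              rw [rep2_cons_not (by rintro ⟨_, h2⟩; simp at h2),
                  rep2_cons_not (a := 'k') (b := 'i') (by rintro ⟨h1, _⟩; exact absurd h1 (by decide)),
                  rep2_match]
              rw [ih t (by simp at h; omega)]
              simp [palRep]
            · rw [rep2_cons_not (by rintro ⟨_, h2⟩; simp at h2; exact hdi h2)]
              rw [rep2_cons_not (by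
                    rintro ⟨_, h2⟩
                    exact head?_rep2_ne 'e' (by simp [hnew0]) (by cases new <;> simp_all) d hde t h2)]
              rw [ih (d :: t) (by simp at h ⊢; omega)]
              simp [palRep, hdi, hde]
        · rw [rep2_cons_not (by rintro ⟨h1, _⟩; exact hck h1)]
          rw [rep2_cons_not (by rintro ⟨h1, _⟩; exact hck h1)]
          rw [ih (d :: t) (by simp at h ⊢; omega)]
          simp [palRep, hck]
  intro l
  exact H l.length l le_rfl

-- A's fold over enumerate equals the per-character rewrite
lemma foldA (reflex full : List Char) :
    ∀ (cs pre acc : List Char), full = pre ++ cs →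
      (PySem.List.enumerate cs (pre.length : Int)).foldl
        (fun acc ic => if ic.2 = 'k' ∧ ic.1 + 1 < (full.length : Int) ∧
            (PySem.List.pyGet? full (ic.1 + 1) = some 'i' ∨
             PySem.List.pyGet? full (ic.1 + 1) = some 'e')
          then acc ++ reflex else acc ++ [ic.2]) acc
      = acc ++ palRep reflex cs := by
  intro cs
  induction cs with
  | nil => intro pre acc _; simp [PySem.List.enumerate, palRep]
  | cons c t ih =>
    intro pre acc hfull
    rw [PySem.List.enumerate_cons, List.foldl_cons]
    have hget : PySem.List.pyGet? full ((pre.length : Int) + 1) = t.head? := by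
      subst hfull
      have := PySem.List.pyGet?_append_right pre (c :: t) 1
      simpa [List.head?_eq_getElem?] using this
    have hlen : ((pre.length : Int) + 1 < (full.length : Int)) ↔ t ≠ [] := by
      subst hfull
      simp [List.length_append]
      constructor
      · intro hlt ht; subst ht; simp at hlt
      · intro ht; have : 0 < t.length := List.length_pos_iff.mpr ht; omega
    have hstep : ∀ acc', (PySem.List.enumerate t ((pre.length : Int) + 1)).foldl
        (fun acc ic => if ic.2 = 'k' ∧ ic.1 + 1 < (full.length : Int) ∧
            (PySem.List.pyGet? full (ic.1 + 1) = some 'i' ∨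
             PySem.List.pyGet? full (ic.1 + 1) = some 'e')
          then acc ++ reflex else acc ++ [ic.2]) acc' = acc' ++ palRep reflex t := by
      intro acc'
      have hlen' : ((pre.length : Int) + 1) = (((pre ++ [c]).length : Nat) : Int) := by
        simp [List.length_append]
      rw [hlen', ih (pre ++ [c]) acc' (by simp [hfull])]
    have hpc : palRep reflex (c :: t) =
        (if c = 'k' ∧ (t.head? = some 'i' ∨ t.head? = some 'e') then reflex else [c]) ++
          palRep reflex t := rfl
    by_cases hc : c = 'k' ∧ (t.head? = some 'i' ∨ t.head? = some 'e')
    · have ht : t ≠ [] := by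
        intro hte; subst hte; rcases hc.2 with h2 | h2 <;> simp at h2
      rw [if_pos ⟨hc.1, hlen.mpr ht, by rw [hget]; exact hc.2⟩]
      rw [hstep, hpc, if_pos hc, List.append_assoc]
    · rw [if_neg (by
        rintro ⟨h1, _, h3⟩
        exact hc ⟨h1, by rwa [hget] at h3⟩)]
      rw [hstep, hpc, if_neg hc, List.append_assoc]

lemma alt_eq (segment : String) (lang : String) (new : List Char)
    (h0 : new.head? = some 'c') (hk : 'k' ∉ new)
    (hrep : ca2_palatalize_alt segment lang =
      String.ofList (rep2 'k' 'e' (new ++ ['e']) (rep2 'k' 'i' (new ++ ['i']) segment.toList))) :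
    ca2_palatalize_alt segment lang = String.ofList (palRep new segment.toList) := by
  rw [hrep, rep2_rep2_eq_palRep new h0 hk]

-- ===== VERDICT (by name: the statement is the Claim_ definition above) =====
theorem ca2_palatalize_spec : Claim_equal_ca2_palatalize := by
  unfold Claim_equal_ca2_palatalize Spec_ca2_palatalize
  intro segment lang _
  by_cases hs : segment = ""
  · subst hs
    rw [ca2_palatalize, if_pos rfl, ca2_palatalize_alt]
    split <;> decide
  · rw [ca2_palatalize, if_neg hs]
    simp only []
    have hA := foldA (if lang = "chinyanja" then ['c', 'h'] else ['c']) segment.toList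
      segment.toList [] [] (by simp)
    rw [show ((([] : List Char).length : Int)) = 0 from by simp] at hA
    rw [hA, List.nil_append]
    by_cases hl : lang = "chinyanja"
    · rw [alt_eq segment lang ['c', 'h'] (by decide) (by simp) ?_]
      · simp [hl]
      · rw [ca2_palatalize_alt, if_pos hl]
        simp only [PySem.Str.replace]
        rw [show ("ki" : String).toList = ['k', 'i'] from by decide,
            show ("chi" : String).toList = ['c', 'h', 'i'] from by decide,
            show ("ke" : String).toList = ['k', 'e'] from by decide,
            show ("che" : String).toList = ['c', 'h', 'e'] from by decide]
        rw [replace_eq_rep2, String.toList_ofList, replace_eq_rep2]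
        rfl
    · rw [alt_eq segment lang ['c'] (by decide) (by simp) ?_]
      · simp [hl]
      · rw [ca2_palatalize_alt, if_neg hl]
        simp only [PySem.Str.replace]
        rw [show ("ki" : String).toList = ['k', 'i'] from by decide,
            show ("ci" : String).toList = ['c', 'i'] from by decide,
            show ("ke" : String).toList = ['k', 'e'] from by decide,
            show ("ce" : String).toList = ['c', 'e'] from by decide]
        rw [replace_eq_rep2, String.toList_ofList, replace_eq_rep2]
        rfl
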